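-- pv_equiv track=rewrite | github.com/mexicanamerican/expressive-prompt-engineering | configs.py | keep_first_neutral
-- ===== SOURCE A (Python) =====
-- def keep_first_neutral(lst):
--     found_neutral = False
--     result = []
--
--     for item in lst:
--         if item == "neutral" and not found_neutral:
--             found_neutral = True
--             result.append(item)
--         elif item != "neutral":
--             result.append(item)
--
--     return result
-- ===== SOURCE B (Python) =====
-- def keep_first_neutral(lst):
--     first = lst.index("neutral") if "neutral" in lst else -1
--     return [x for i, x in enumerate(lst) if x != "neutral" or i == first]
-- ===== Notes on version B (the rewrite author's own statement) =====
-- stated objective: alternative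
-- what changed: Replaces the stateful found_neutral flag loop with a precomputed first-occurrence index (list.index) followed by a single index-aware filtering comprehension.
import Mathlib
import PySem

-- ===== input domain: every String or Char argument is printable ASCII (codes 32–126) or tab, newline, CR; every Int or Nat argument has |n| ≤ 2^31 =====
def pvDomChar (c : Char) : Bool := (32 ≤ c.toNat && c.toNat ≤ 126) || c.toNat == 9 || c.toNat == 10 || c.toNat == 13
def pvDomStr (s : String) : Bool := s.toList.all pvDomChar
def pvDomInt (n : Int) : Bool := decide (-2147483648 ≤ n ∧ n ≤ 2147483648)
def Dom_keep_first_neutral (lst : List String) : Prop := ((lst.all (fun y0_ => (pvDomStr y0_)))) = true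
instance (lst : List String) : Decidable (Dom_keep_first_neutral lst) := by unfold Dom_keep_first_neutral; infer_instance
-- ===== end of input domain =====

-- ===== PORT A =====
-- A: one pass with a found_neutral flag accumulated through a fold.
def stepA (st : Bool × List String) (item : String) : Bool × List String :=
  if item = "neutral" ∧ st.1 = false then (true, st.2 ++ [item])
  else if item ≠ "neutral" then (st.1, st.2 ++ [item])
  else st

def keep_first_neutral (lst : List String) : List String :=
  (lst.foldl stepA (false, [])).2

-- ===== PORT B =====
-- B: precompute the index of the first "neutral" (sentinel -1 if absent), then one filter pass.
def keep_first_neutral_alt (lst : List String) : List String :=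
  let first : Int :=
    match PySem.List.index? lst "neutral" with
    | some i => (i : Int)
    | none => -1
  ((PySem.List.enumerate lst).filter (fun p => p.2 != "neutral" || p.1 == first)).map (·.2)

-- ===== PRECONDITION & SPEC =====
def Spec_keep_first_neutral (lst : List String) (out : List String) : Prop := out = keep_first_neutral_alt lst
instance (lst : List String) (out : List String) : Decidable (Spec_keep_first_neutral lst out) := by unfold Spec_keep_first_neutral; infer_instance

-- ===== CLAIM (what is proved, stated in full; the proofs are below) =====
def Claim_equal_keep_first_neutral : Prop := ∀ (lst : List String), Dom_keep_first_neutral lst → Spec_keep_first_neutral lst (keep_first_neutral lst)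

-- ===== LEMMAS AND PROOFS =====

-- common reference function: g b lst = remaining output when flag already b
def g (b : Bool) : List String → List String
  | [] => []
  | x :: xs => if x = "neutral" then (if b then g b xs else x :: g true xs) else x :: g b xs

theorem foldl_stepA (lst : List String) (b : Bool) (acc : List String) :
    (lst.foldl stepA (b, acc)).2 = acc ++ g b lst := by
  induction lst generalizing b acc with
  | nil => simp [g]
  | cons x xs ih =>
    by_cases hx : x = "neutral" <;> cases b <;>
      simp [stepA, hx, g, ih, List.append_assoc]

theorem g_true (xs : List String) : g true xs = xs.filter (fun x => x != "neutral") := by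
  induction xs with
  | nil => simp [g]
  | cons x xs ih =>
    by_cases hx : x = "neutral" <;> simp [g, hx, ih]

theorem g_false_no_neutral (xs : List String) (h : "neutral" ∉ xs) : g false xs = xs := by
  induction xs with
  | nil => rfl
  | cons x xs ih =>
    simp only [List.mem_cons, not_or] at h
    simp [g, Ne.symm h.1, ih h.2]

theorem g_append_no_neutral (pre rest : List String) (h : "neutral" ∉ pre) :
    g false (pre ++ rest) = pre ++ g false rest := by
  induction pre with
  | nil => rfl
  | cons x xs ih =>
    simp only [List.mem_cons, not_or] at h
    simp [g, Ne.symm h.1, ih h.2]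

theorem filt_all_ne (xs : List String) (s c : Int) (h : "neutral" ∉ xs) :
    ((PySem.List.enumerate xs s).filter (fun p => p.2 != "neutral" || p.1 == c)).map (·.2) = xs := by
  induction xs generalizing s with
  | nil => simp [PySem.List.enumerate_nil]
  | cons x xs ih =>
    simp only [List.mem_cons, not_or] at h
    simp [PySem.List.enumerate_cons, Ne.symm h.1, ih _ h.2]

theorem filt_lt (xs : List String) (s c : Int) (h : c < s) :
    ((PySem.List.enumerate xs s).filter (fun p => p.2 != "neutral" || p.1 == c)).map (·.2)
      = xs.filter (fun x => x != "neutral") := by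
  induction xs generalizing s with
  | nil => simp [PySem.List.enumerate_nil]
  | cons x xs ih =>
    have hne : s ≠ c := by omega
    have h' : c < s + 1 := by omega
    by_cases hx : x = "neutral" <;>
      simp [PySem.List.enumerate_cons, hx, hne, ih _ h']

theorem alt_eq_g (lst : List String) : keep_first_neutral_alt lst = g false lst := by
  unfold keep_first_neutral_alt
  cases hidx : PySem.List.index? lst "neutral" with
  | none =>
    have hmem : "neutral" ∉ lst := (PySem.List.index?_eq_none_iff lst "neutral").mp hidx
    simp only []
    rw [filt_all_ne lst 0 (-1) hmem, g_false_no_neutral lst hmem]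
  | some k =>
    obtain ⟨pre, suf, hdec, hlen, hpre⟩ := (PySem.List.index?_eq_some_iff lst "neutral" k).mp hidx
    subst hdec
    simp only []
    rw [PySem.List.enumerate_append, PySem.List.enumerate_cons, List.filter_append,
        List.map_append, filt_all_ne pre 0 k hpre, List.filter_cons]
    have hk : (0 : Int) + pre.length = (k : Int) := by simp [hlen]
    rw [hk]
    simp only [bne_self_eq_false, BEq.refl, Bool.or_true, if_pos, List.map_cons]
    rw [filt_lt suf ((k : Int) + 1) (k : Int) (by omega)]
    rw [g_append_no_neutral pre _ hpre]
    have : g false ("neutral" :: suf) = "neutral" :: g true suf := by simp [g]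
    rw [this, g_true]

-- ===== VERDICT (by name: the statement is the Claim_ definition above) =====
theorem keep_first_neutral_spec : Claim_equal_keep_first_neutral := by
  intro lst _
  unfold Spec_keep_first_neutral
  rw [alt_eq_g]
  unfold keep_first_neutral
  simpa using foldl_stepA lst false []
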